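-- pv_equiv track=rewrite | github.com/M4mB14/ENU_Cipher | cipher_function.py | pbox_permutation
-- ===== SOURCE A (Python) =====
-- DEFAULT_PBOX_MAP_16 = {
--     1: 12, 2: 3, 3: 9, 4: 14,
--     5: 1, 6: 7, 7: 15, 8: 4,
--     9: 10, 10: 16, 11: 8, 12: 2,
--     13: 13, 14: 6, 15: 11, 16: 5
-- }
--
-- def make_identity_pbox_map(n_bits):
--     return {i + 1: i + 1 for i in range(n_bits)}
--
-- def pbox_permutation(bits, inverse=False, pbox_map=None, chunk_size=16):
--     if pbox_map is None:
--         if chunk_size == 16: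
--             table = {k: v for k, v in DEFAULT_PBOX_MAP_16.items()}
--         else:
--             table = make_identity_pbox_map(chunk_size)
--     else:
--         table = {v: k for k, v in pbox_map.items()} if inverse else pbox_map
--     out_bits = ""
--     for i in range(0, len(bits), chunk_size):
--         block = bits[i:i + chunk_size]
--         if len(block) < chunk_size:
--             block = block.ljust(chunk_size, '0')
--         permuted = ['0'] * chunk_size
--         for src, dest in table.items():
--             if 1 <= src <= len(block) and 1 <= dest <= chunk_size:
--                 permuted[dest - 1] = block[src - 1]
--         out_bits += ''.join(permuted)
--     return out_bits
-- ===== SOURCE B (Python) =====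
-- DEFAULT_PBOX_MAP_16 = {
--     1: 12, 2: 3, 3: 9, 4: 14,
--     5: 1, 6: 7, 7: 15, 8: 4,
--     9: 10, 10: 16, 11: 8, 12: 2,
--     13: 13, 14: 6, 15: 11, 16: 5
-- }
--
-- def make_identity_pbox_map(n_bits):
--     return {i + 1: i + 1 for i in range(n_bits)}
--
-- def pbox_permutation(bits, inverse=False, pbox_map=None, chunk_size=16):
--     if pbox_map is None:
--         if chunk_size == 16:
--             table = dict(DEFAULT_PBOX_MAP_16)
--         else:
--             table = make_identity_pbox_map(chunk_size)
--     else: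
--         table = {v: k for k, v in pbox_map.items()} if inverse else pbox_map
--     # invert once: for each output position d, which input position feeds it
--     # (sequential overwrite keeps last-write-wins on colliding destinations)
--     rev = {}
--     for src, dest in table.items():
--         if 1 <= src <= chunk_size and 1 <= dest <= chunk_size:
--             rev[dest] = src
--     pieces = []
--     for i in range(0, len(bits), chunk_size):
--         block = bits[i:i + chunk_size].ljust(chunk_size, '0')
--         pieces.append(''.join(block[rev[d] - 1] if d in rev else '0'
--                               for d in range(1, chunk_size + 1)))
--     return ''.join(pieces)
-- ===== Notes on version B (the rewrite author's own statement) =====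
-- stated objective: alternative
-- what changed: B inverts the permutation table once into a dest->src map (sequential overwrite, preserving last-write-wins) and gathers each output position of every chunk, instead of A's per-chunk scatter of all table entries into a preset buffer.
import Mathlib
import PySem

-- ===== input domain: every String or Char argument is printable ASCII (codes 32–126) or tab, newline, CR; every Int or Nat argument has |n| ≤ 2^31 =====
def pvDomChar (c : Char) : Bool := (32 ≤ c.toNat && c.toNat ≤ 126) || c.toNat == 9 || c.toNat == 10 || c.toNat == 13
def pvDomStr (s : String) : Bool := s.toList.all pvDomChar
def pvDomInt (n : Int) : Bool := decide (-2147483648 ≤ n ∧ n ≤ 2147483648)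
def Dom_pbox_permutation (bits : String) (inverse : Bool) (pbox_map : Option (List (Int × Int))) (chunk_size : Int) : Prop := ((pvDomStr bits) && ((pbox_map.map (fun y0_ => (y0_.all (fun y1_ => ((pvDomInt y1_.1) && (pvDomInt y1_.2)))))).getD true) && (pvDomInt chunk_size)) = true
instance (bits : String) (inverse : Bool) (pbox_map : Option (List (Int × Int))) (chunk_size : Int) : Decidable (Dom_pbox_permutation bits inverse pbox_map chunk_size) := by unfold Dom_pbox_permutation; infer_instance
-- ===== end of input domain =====

-- B inverts the table into a dest→src map once and GATHERS each output position,
-- instead of A's per-chunk SCATTER of table entries into a preset buffer (objective: alternative).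

-- ===== PORT A =====
-- both Pythons build the table with identical code, so the builder is a shared helper
def pboxDefault16 : List (Int × Int) :=
  [(1,12),(2,3),(3,9),(4,14),(5,1),(6,7),(7,15),(8,4),(9,10),(10,16),(11,8),(12,2),(13,13),(14,6),(15,11),(16,5)]

def make_identity_pbox_map (n_bits : Int) : PySem.Dict Int Int :=
  PySem.Dict.ofList ((PySem.List.pyRange 0 n_bits 1).map (fun i => (i + 1, i + 1)))

def pboxTable (inverse : Bool) (pbox_map : Option (List (Int × Int))) (chunk_size : Int) : PySem.Dict Int Int :=
  match pbox_map with
  | none => if chunk_size == 16 then PySem.Dict.ofList pboxDefault16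
            else make_identity_pbox_map chunk_size
  | some m =>
      let d := PySem.Dict.ofList m  -- the Python receives pbox_map as a dict
      if inverse then PySem.Dict.ofList (d.items.map (fun p => (p.2, p.1))) else d

def pbox_permutation (bits : String) (inverse : Bool) (pbox_map : Option (List (Int × Int))) (chunk_size : Int) : String :=
  let table := pboxTable inverse pbox_map chunk_size
  let bl := bits.toList
  let out := (PySem.List.pyRange 0 (bl.length : Int) chunk_size).foldl (fun acc i =>
    let block0 := PySem.List.slice bl (some i) (some (i + chunk_size))
    -- block.ljust(chunk_size, '0'), applied only when len(block) < chunk_size as in A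
    let block := if (block0.length : Int) < chunk_size
                 then block0 ++ List.replicate (chunk_size.toNat - block0.length) '0'
                 else block0
    let permuted := table.items.foldl (fun perm p =>
        if 1 ≤ p.1 ∧ p.1 ≤ (block.length : Int) ∧ 1 ≤ p.2 ∧ p.2 ≤ chunk_size
        -- the guard makes both indexings in range, so set/pyGet? with default are exact here
        then perm.set (p.2 - 1).toNat ((PySem.List.pyGet? block (p.1 - 1)).getD '0')
        else perm) (List.replicate chunk_size.toNat '0')
    acc ++ permuted) ([] : List Char)
  String.mk out

-- ===== PORT B =====
def pbox_permutation_alt (bits : String) (inverse : Bool) (pbox_map : Option (List (Int × Int))) (chunk_size : Int) : String :=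
  let table := pboxTable inverse pbox_map chunk_size
  let rev := table.items.foldl (fun r p =>
      if 1 ≤ p.1 ∧ p.1 ≤ chunk_size ∧ 1 ≤ p.2 ∧ p.2 ≤ chunk_size
      then r.insert p.2 p.1 else r) (PySem.Dict.empty : PySem.Dict Int Int)
  let bl := bits.toList
  let pieces := (PySem.List.pyRange 0 (bl.length : Int) chunk_size).foldl (fun acc i =>
      let block0 := PySem.List.slice bl (some i) (some (i + chunk_size))
      let block := block0 ++ List.replicate (chunk_size.toNat - block0.length) '0'  -- ljust
      acc ++ [(PySem.List.pyRange 1 (chunk_size + 1) 1).map (fun d =>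
        match rev.get? d with
        | some s => (PySem.List.pyGet? block (s - 1)).getD '0'  -- in range: rev only holds 1 ≤ s ≤ chunk_size
        | none => '0')]) ([] : List (List Char))
  String.mk pieces.flatten

-- ===== PRECONDITION & SPEC =====
-- A raises ValueError (range step 0) when chunk_size = 0; B raises there too.
def Pre_pbox_permutation (bits : String) (inverse : Bool) (pbox_map : Option (List (Int × Int))) (chunk_size : Int) : Prop := chunk_size ≠ 0
instance (bits : String) (inverse : Bool) (pbox_map : Option (List (Int × Int))) (chunk_size : Int) : Decidable (Pre_pbox_permutation bits inverse pbox_map chunk_size) := by unfold Pre_pbox_permutation; infer_instance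

def pvWitness_pbox_permutation : String × Bool × (Option (List (Int × Int))) × Int := ("10110", false, some [(1, 3), (2, 1), (3, 2)], 3)

def Spec_pbox_permutation (bits : String) (inverse : Bool) (pbox_map : Option (List (Int × Int))) (chunk_size : Int) (out : String) : Prop := out = pbox_permutation_alt bits inverse pbox_map chunk_size
instance (bits : String) (inverse : Bool) (pbox_map : Option (List (Int × Int))) (chunk_size : Int) (out : String) : Decidable (Spec_pbox_permutation bits inverse pbox_map chunk_size out) := by unfold Spec_pbox_permutation; infer_instance

-- ===== CLAIM (what is proved, stated in full; the proofs are below) =====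
def Claim_equal_pbox_permutation : Prop := ∀ (bits : String) (inverse : Bool) (pbox_map : Option (List (Int × Int))) (chunk_size : Int), Dom_pbox_permutation bits inverse pbox_map chunk_size → Pre_pbox_permutation bits inverse pbox_map chunk_size → Spec_pbox_permutation bits inverse pbox_map chunk_size (pbox_permutation bits inverse pbox_map chunk_size)

-- ===== LEMMAS AND PROOFS =====

-- the per-position value B gathers
def pvGather (block : List Char) (r : PySem.Dict Int Int) (d : Int) : Char :=
  match r.get? d with
  | some s => (PySem.List.pyGet? block (s - 1)).getD '0'
  | none => '0'

lemma pv_flatMap_congr_mem {a b : Type} (l : List a) (f g : a -> List b)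
    (h : forall x, x ∈ l -> f x = g x) : l.flatMap f = l.flatMap g := by
  induction l with
  | nil => rfl
  | cons x xs ih =>
    simp only [List.flatMap_cons]
    rw [h x (by simp), ih (fun y hy => h y (by simp [hy]))]

lemma pv_invariant (cs : Int) (block : List Char) (hb : (block.length : Int) = cs)
    (t : List (Int × Int)) :
    forall (perm : List Char) (r : PySem.Dict Int Int),
    perm.length = cs.toNat ->
    (forall j : Nat, j < cs.toNat -> perm[j]? = some (pvGather block r ((j : Int) + 1))) ->
    (t.foldl (fun perm p =>
        if 1 ≤ p.1 ∧ p.1 ≤ (block.length : Int) ∧ 1 ≤ p.2 ∧ p.2 ≤ cs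
        then perm.set (p.2 - 1).toNat ((PySem.List.pyGet? block (p.1 - 1)).getD '0')
        else perm) perm).length = cs.toNat ∧
    (forall j : Nat, j < cs.toNat ->
      (t.foldl (fun perm p =>
        if 1 ≤ p.1 ∧ p.1 ≤ (block.length : Int) ∧ 1 ≤ p.2 ∧ p.2 ≤ cs
        then perm.set (p.2 - 1).toNat ((PySem.List.pyGet? block (p.1 - 1)).getD '0')
        else perm) perm)[j]? =
      some (pvGather block (t.foldl (fun r p =>
        if 1 ≤ p.1 ∧ p.1 ≤ cs ∧ 1 ≤ p.2 ∧ p.2 ≤ cs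
        then r.insert p.2 p.1 else r) r) ((j : Int) + 1))) := by
  induction t with
  | nil => intro perm r hlen hinv; exact ⟨hlen, hinv⟩
  | cons p t ih =>
    intro perm r hlen hinv
    have hbg : (1 ≤ p.1 ∧ p.1 ≤ (block.length : Int) ∧ 1 ≤ p.2 ∧ p.2 ≤ cs) ↔
        (1 ≤ p.1 ∧ p.1 ≤ cs ∧ 1 ≤ p.2 ∧ p.2 ≤ cs) := by rw [hb]
    simp only [List.foldl_cons]
    by_cases hg : 1 ≤ p.1 ∧ p.1 ≤ cs ∧ 1 ≤ p.2 ∧ p.2 ≤ cs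
    · rw [if_pos (hbg.mpr hg), if_pos hg]
      refine ih _ _ (by simp [hlen]) ?_
      intro j hj
      obtain ⟨h1, h2, h3, h4⟩ := hg
      by_cases hd : (j : Int) + 1 = p.2
      · have hjeq : (p.2 - 1).toNat = j := by omega
        subst hjeq
        rw [List.getElem?_set_self (by rw [hlen]; omega)]
        simp only [pvGather, PySem.Dict.get?_insert, if_pos hd]
      · rw [List.getElem?_set_ne (by omega : (p.2 - 1).toNat ≠ j), hinv j hj]
        simp only [pvGather, PySem.Dict.get?_insert, if_neg hd]
    · rw [if_neg (fun h => hg (hbg.mp h)), if_neg hg]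
      exact ih _ _ hlen hinv

lemma pv_scatter_eq_gather (cs : Int) (block : List Char) (hb : (block.length : Int) = cs)
    (t : List (Int × Int)) :
    t.foldl (fun perm p =>
        if 1 ≤ p.1 ∧ p.1 ≤ (block.length : Int) ∧ 1 ≤ p.2 ∧ p.2 ≤ cs
        then perm.set (p.2 - 1).toNat ((PySem.List.pyGet? block (p.1 - 1)).getD '0')
        else perm) (List.replicate cs.toNat '0')
    = (PySem.List.pyRange 1 (cs + 1) 1).map (fun d =>
        match (t.foldl (fun r p =>
          if 1 ≤ p.1 ∧ p.1 ≤ cs ∧ 1 ≤ p.2 ∧ p.2 ≤ cs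
          then r.insert p.2 p.1 else r) (PySem.Dict.empty : PySem.Dict Int Int)).get? d with
        | some s => (PySem.List.pyGet? block (s - 1)).getD '0'
        | none => '0') := by
  obtain ⟨hlen, hpt⟩ := pv_invariant cs block hb t (List.replicate cs.toNat '0') PySem.Dict.empty
    (by simp)
    (by intro j hj
        rw [List.getElem?_replicate, if_pos hj]
        simp [pvGather, PySem.Dict.get?_empty])
  apply List.ext_getElem?
  intro j
  by_cases hj : j < cs.toNat
  · rw [hpt j hj, List.getElem?_map, PySem.List.pyRange_one]
    rw [List.getElem?_map, List.getElem?_range (by omega : j < (cs + 1 - 1).toNat)]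
    simp only [Option.map_some]
    have h1 : (1 : Int) + (j : Int) = (j : Int) + 1 := by ring
    rw [h1]
    rfl
  · rw [List.getElem?_eq_none (by rw [hlen]; omega),
        List.getElem?_eq_none (by rw [List.length_map, PySem.List.pyRange_one, List.length_map, List.length_range]; omega)]

lemma pv_pyRange_neg_nil (n s : Int) (hn : 0 ≤ n) (hs : s < 0) : PySem.List.pyRange 0 n s = [] := by
  simp only [PySem.List.pyRange]
  rw [if_neg (by omega : ¬ s = 0), if_neg (by omega : ¬ 0 < s), if_neg (by omega : ¬ n < 0)]
  simp

lemma pv_flatMap_singleton {a b : Type} (l : List a) (f : a -> List b) :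
    l.flatMap (fun x => [f x]) = l.map f := by
  induction l with
  | nil => rfl
  | cons x xs ih => simp only [List.flatMap_cons, List.map_cons, List.singleton_append, ih]

theorem pbox_permutation_spec : Claim_equal_pbox_permutation := by
  intro bits inverse pbox_map chunk_size _hdom hpre
  unfold Spec_pbox_permutation pbox_permutation pbox_permutation_alt
  simp only []
  rcases lt_or_gt_of_ne hpre with hneg | hpos
  · rw [pv_pyRange_neg_nil _ _ (by positivity) hneg]
    rfl
  · congr 1
    rw [PySem.List.foldl_append_eq_flatMap, PySem.List.foldl_append_eq_flatMap]
    simp only [List.nil_append]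
    rw [pv_flatMap_singleton, <- List.flatMap_def]
    apply pv_flatMap_congr_mem
    intro i hi
    rw [PySem.List.mem_pyRange_iff_of_pos hpos] at hi
    obtain ⟨hi0, -, -⟩ := hi
    have hle : (PySem.List.slice bits.toList (some i) (some (i + chunk_size))).length ≤ chunk_size.toNat := by
      rw [PySem.List.slice_toNat bits.toList (by omega : (0:Int) ≤ i) (by omega : (0:Int) ≤ i + chunk_size), List.length_take]
      omega
    have hAB : (if ((PySem.List.slice bits.toList (some i) (some (i + chunk_size))).length : Int) < chunk_size
                 then PySem.List.slice bits.toList (some i) (some (i + chunk_size)) ++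
                      List.replicate (chunk_size.toNat - (PySem.List.slice bits.toList (some i) (some (i + chunk_size))).length) '0'
                 else PySem.List.slice bits.toList (some i) (some (i + chunk_size)))
              = PySem.List.slice bits.toList (some i) (some (i + chunk_size)) ++
                List.replicate (chunk_size.toNat - (PySem.List.slice bits.toList (some i) (some (i + chunk_size))).length) '0' := by
      split_ifs with h
      · rfl
      · have h0 : chunk_size.toNat - (PySem.List.slice bits.toList (some i) (some (i + chunk_size))).length = 0 := by omega
        rw [h0, List.replicate_zero, List.append_nil]
    rw [hAB]
    exact pv_scatter_eq_gather chunk_size _ (by rw [List.length_append, List.length_replicate]; push_cast; omega) _
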